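-- pv_equiv track=rewrite | github.com/tgy1201/coding-test | 프로그래머스/2/389479. 서버 증설 횟수/서버 증설 횟수.py | solution
-- ===== SOURCE A (Python) =====
-- def solution(players, m, k):
--     answer = 0
--     machine = []
--     cnt = 0
--
--     for i in players:
--         if len(machine) == k:
--             machine.pop(0)
--         if i < m:
--             machine.append(0)
--         else:
--             need = i // m
--             temp = sum(machine)
--             if temp >= need:
--                 machine.append(0)
--             else:
--                 machine.append(need-temp)
--                 answer += need-temp
--
--     return answer
-- ===== SOURCE B (Python) =====
-- def solution(players, m, k):
--     answer = 0
--     s = 0        # running sum of the currently active additions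
--     adds = []    # append-only log: the addition made at every step
--     wlen = 0     # how many log entries are currently active
--     for i in players:
--         if wlen == k:
--             s -= adds[len(adds) - k]   # the entry that falls out of the window
--             wlen -= 1
--         add = 0 if i < m else max(i // m - s, 0)
--         answer += add
--         adds.append(add)
--         s += add
--         wlen += 1
--     return answer
-- ===== Notes on version B (the rewrite author's own statement) =====
-- stated objective: faster
-- what changed: B maintains the sliding window's sum incrementally (subtract on pop, add on append), eliminating A's sum(machine) rescan of up to k elements in every iteration.
import Mathlib
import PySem

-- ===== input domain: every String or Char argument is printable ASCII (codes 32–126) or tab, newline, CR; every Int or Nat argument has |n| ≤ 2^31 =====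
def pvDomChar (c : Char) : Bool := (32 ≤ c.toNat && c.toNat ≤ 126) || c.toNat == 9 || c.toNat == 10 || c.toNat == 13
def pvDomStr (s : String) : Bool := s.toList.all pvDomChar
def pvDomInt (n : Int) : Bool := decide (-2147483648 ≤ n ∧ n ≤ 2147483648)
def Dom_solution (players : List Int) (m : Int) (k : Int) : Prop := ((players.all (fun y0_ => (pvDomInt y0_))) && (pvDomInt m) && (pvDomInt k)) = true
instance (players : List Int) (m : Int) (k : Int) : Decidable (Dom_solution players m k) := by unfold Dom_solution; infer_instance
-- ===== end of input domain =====

-- B replaces A's per-step sum(machine) rescan and pop(0) by an append-only log with a running window sum (O(n) vs A's O(n*k)); timing run measured B faster.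


-- ===== PORT A =====
-- one loop iteration of A: state = (answer, machine)
def solStepA (m k : Int) (st : Int × List Int) (i : Int) : Int × List Int :=
  let answer := st.1
  let machine := if (st.2.length : Int) = k then st.2.drop 1 else st.2
  if i < m then (answer, machine ++ [0])
  else
    let need := PySem.Int.floordiv i m
    let temp := machine.foldl (· + ·) 0          -- sum(machine)
    if temp ≥ need then (answer, machine ++ [0])
    else (answer + (need - temp), machine ++ [need - temp])

def solution (players : List Int) (m : Int) (k : Int) : Int :=
  (players.foldl (solStepA m k) (0, [])).1

-- ===== PORT B =====
-- one loop iteration of B: state = (answer, s, adds, wlen)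
-- adds[len(adds)-k]: the index is nonnegative and in range whenever the branch
-- fires on an input Pre_ admits, so pyGet? + getD 0 only totalises the port.
def solStepB (m k : Int) (st : Int × Int × List Int × Int) (i : Int) : Int × Int × List Int × Int :=
  let answer := st.1
  let s := if st.2.2.2 = k then st.2.1 - (PySem.List.pyGet? st.2.2.1 ((st.2.2.1.length : Int) - k)).getD 0 else st.2.1
  let wlen := if st.2.2.2 = k then st.2.2.2 - 1 else st.2.2.2
  let add := if i < m then 0 else max (PySem.Int.floordiv i m - s) 0
  (answer + add, s + add, st.2.2.1 ++ [add], wlen + 1)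

def solution_alt (players : List Int) (m : Int) (k : Int) : Int :=
  (players.foldl (solStepB m k) (0, 0, [], 0)).1

-- ===== PRECONDITION & SPEC =====
-- Pre excludes exactly the inputs where A raises: k = 0 with nonempty players
-- (machine.pop(0) on the empty window, IndexError) and m = 0 with some i ≥ 0
-- (i // 0, ZeroDivisionError).
def Pre_solution (players : List Int) (m : Int) (k : Int) : Prop :=
  (k ≠ 0 ∨ players = []) ∧ (m ≠ 0 ∨ ∀ i ∈ players, i < 0)
instance (players : List Int) (m : Int) (k : Int) : Decidable (Pre_solution players m k) := by
  unfold Pre_solution; infer_instance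
def pvWitness_solution : List Int × Int × Int := ([10, 1, 7, 15], 5, 2)

def Spec_solution (players : List Int) (m : Int) (k : Int) (out : Int) : Prop := out = solution_alt players m k
instance (players : List Int) (m : Int) (k : Int) (out : Int) : Decidable (Spec_solution players m k out) := by unfold Spec_solution; infer_instance

-- ===== CLAIM (what is proved, stated in full; the proofs are below) =====
def Claim_equal_solution : Prop := ∀ (players : List Int) (m : Int) (k : Int), Dom_solution players m k → Pre_solution players m k → Spec_solution players m k (solution players m k)

-- ===== LEMMAS AND PROOFS =====

theorem sum_foldl (L : List Int) : L.foldl (· + ·) 0 = L.sum := by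
  simp [List.sum_eq_foldl]

-- one step of B simulates one step of A, given the running-sum/suffix invariant
theorem step_sim (m k : Int) (hk : k ≠ 0) (ans : Int) (machine adds : List Int) (i : Int)
    (h2 : machine = adds.drop (adds.length - machine.length))
    (h4 : machine.length ≤ adds.length) :
    (solStepB m k (ans, machine.sum, adds, (machine.length : Int)) i).1
        = (solStepA m k (ans, machine) i).1 ∧
    (solStepB m k (ans, machine.sum, adds, (machine.length : Int)) i).2.1
        = (solStepA m k (ans, machine) i).2.sum ∧
    (solStepA m k (ans, machine) i).2
        = (solStepB m k (ans, machine.sum, adds, (machine.length : Int)) i).2.2.1.drop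
            ((solStepB m k (ans, machine.sum, adds, (machine.length : Int)) i).2.2.1.length
              - (solStepA m k (ans, machine) i).2.length) ∧
    (solStepB m k (ans, machine.sum, adds, (machine.length : Int)) i).2.2.2
        = ((solStepA m k (ans, machine) i).2.length : Int) ∧
    (solStepA m k (ans, machine) i).2.length
        ≤ (solStepB m k (ans, machine.sum, adds, (machine.length : Int)) i).2.2.1.length := by
  by_cases hpop : (machine.length : Int) = k
  · -- pop branch: machine has length k ≠ 0, so it is a nonempty suffix of adds
    have hlen : 0 < machine.length := by
      rcases machine with _ | ⟨h, t⟩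
      · exfalso; simp at hpop; omega
      · simp
    have hd : (adds.length : Int) - k = ((adds.length - machine.length : Nat) : Int) := by
      omega
    have hget : (PySem.List.pyGet? adds ((adds.length : Int) - k)).getD 0 = machine.headD 0 := by
      rw [hd, PySem.List.pyGet?_natCast, ← List.head?_drop, ← h2]
      simp [List.headD_eq_head?_getD]
    have hsum : machine.sum - machine.headD 0 = machine.tail.sum := by
      rcases machine with _ | ⟨h, t⟩
      · simp at hlen
      · simp <;> ring
    have hdrop : ∀ x : Int, machine.tail ++ [x]
        = (adds ++ [x]).drop (adds.length + 1 - (machine.tail.length + 1)) := by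
      intro x
      have hl : machine.tail.length = machine.length - 1 := by
        rcases machine with _ | ⟨h, t⟩ <;> simp
      rw [List.drop_append_of_le_length (by omega)]
      have h1 : adds.length + 1 - (machine.tail.length + 1)
          = (adds.length - machine.length) + 1 := by omega
      rw [h1, ← List.drop_drop, ← h2, List.drop_one]
    have hsumfold : machine.tail.foldl (· + ·) 0 = machine.tail.sum := sum_foldl _
    unfold solStepA solStepB
    simp only [ge_iff_le, if_pos hpop, hget, hsum, List.drop_one, hsumfold]
    by_cases hm : i < m
    · simp only [if_pos hm]
      refine ⟨?_, ?_, ?_, ?_, ?_⟩ <;>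
        first
          | trivial
          | omega
          | (simpa [List.length_append] using hdrop _)
          | (simp [List.sum_append] <;> omega)
          | (simp [List.length_append] <;> omega)
    · simp only [if_neg hm]
      by_cases htmp : PySem.Int.floordiv i m ≤ machine.tail.sum
      · have hmax : max (PySem.Int.floordiv i m - machine.tail.sum) 0 = 0 := by omega
        simp only [if_pos htmp, hmax]
        refine ⟨?_, ?_, ?_, ?_, ?_⟩ <;>
        first
          | trivial
          | omega
          | (simpa [List.length_append] using hdrop _)
          | (simp [List.sum_append] <;> omega)
          | (simp [List.length_append] <;> omega)
      · have hmax : max (PySem.Int.floordiv i m - machine.tail.sum) 0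
            = PySem.Int.floordiv i m - machine.tail.sum := by omega
        simp only [if_neg htmp, hmax]
        refine ⟨?_, ?_, ?_, ?_, ?_⟩ <;>
        first
          | trivial
          | omega
          | (simpa [List.length_append] using hdrop _)
          | (simp [List.sum_append] <;> omega)
          | (simp [List.length_append] <;> omega)
  · -- no pop
    have hdrop : ∀ x : Int, machine ++ [x]
        = (adds ++ [x]).drop (adds.length + 1 - (machine.length + 1)) := by
      intro x
      rw [List.drop_append_of_le_length (by omega)]
      have h1 : adds.length + 1 - (machine.length + 1) = adds.length - machine.length := by omega
      rw [h1, ← h2]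
    have hsumfold : machine.foldl (· + ·) 0 = machine.sum := sum_foldl _
    unfold solStepA solStepB
    simp only [ge_iff_le, if_neg hpop, hsumfold]
    by_cases hm : i < m
    · simp only [if_pos hm]
      refine ⟨?_, ?_, ?_, ?_, ?_⟩ <;>
        first
          | trivial
          | omega
          | (simpa [List.length_append] using hdrop _)
          | (simp [List.sum_append] <;> omega)
          | (simp [List.length_append] <;> omega)
    · simp only [if_neg hm]
      by_cases htmp : PySem.Int.floordiv i m ≤ machine.sum
      · have hmax : max (PySem.Int.floordiv i m - machine.sum) 0 = 0 := by omega
        simp only [if_pos htmp, hmax]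
        refine ⟨?_, ?_, ?_, ?_, ?_⟩ <;>
        first
          | trivial
          | omega
          | (simpa [List.length_append] using hdrop _)
          | (simp [List.sum_append] <;> omega)
          | (simp [List.length_append] <;> omega)
      · have hmax : max (PySem.Int.floordiv i m - machine.sum) 0
            = PySem.Int.floordiv i m - machine.sum := by omega
        simp only [if_neg htmp, hmax]
        refine ⟨?_, ?_, ?_, ?_, ?_⟩ <;>
        first
          | trivial
          | omega
          | (simpa [List.length_append] using hdrop _)
          | (simp [List.sum_append] <;> omega)
          | (simp [List.length_append] <;> omega)

theorem fold_sim (m k : Int) (hk : k ≠ 0) (players : List Int) (ans : Int)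
    (machine adds : List Int)
    (h2 : machine = adds.drop (adds.length - machine.length))
    (h4 : machine.length ≤ adds.length) :
    (players.foldl (solStepB m k) (ans, machine.sum, adds, (machine.length : Int))).1
      = (players.foldl (solStepA m k) (ans, machine)).1 := by
  induction players generalizing ans machine adds with
  | nil => simp
  | cons i rest ih =>
      obtain ⟨e1, e2, e3, e4, e5⟩ := step_sim m k hk ans machine adds i h2 h4
      simp only [List.foldl_cons]
      have hB : solStepB m k (ans, machine.sum, adds, (machine.length : Int)) i
          = ((solStepA m k (ans, machine) i).1,
             (solStepA m k (ans, machine) i).2.sum,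
             (solStepB m k (ans, machine.sum, adds, (machine.length : Int)) i).2.2.1,
             ((solStepA m k (ans, machine) i).2.length : Int)) := by
        ext1
        · exact e1
        ext1
        · exact e2
        ext1
        · rfl
        · exact e4
      rw [hB]
      exact ih _ _ _ e3 e5

-- ===== VERDICT (by name: the statement is the Claim_ definition above) =====
theorem solution_spec : Claim_equal_solution := by
  intro players m k _ hpre
  unfold Spec_solution solution solution_alt
  rcases hpre with ⟨hk | hnil, -⟩
  · exact (fold_sim m k hk players 0 [] [] (by simp) (by simp)).symm
  · subst hnil; rfl
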